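-- pv_equiv track=rewrite | github.com/Hmdgt2/tol | backup_biblioteca_original_20251018_210749/topologia_algebrica.py | betti_numbers_approx
-- ===== SOURCE A (Python) =====
-- from typing import List, Tuple
--
-- def betti_numbers_approx(simplicial_complex: List[List[int]]) -> List[int]:
--     """Números de Betti aproximados de um complexo simplicial."""
--     if not simplicial_complex:
--         return [0]
--
--     max_dim = max(len(simplex) - 1 for simplex in simplicial_complex)
--     betti = []
--
--     for dim in range(max_dim + 1):
--         # Simplificação: contar k-simplexos menos arestas
--         k_simplices = [s for s in simplicial_complex if len(s) == dim + 1]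
--         betti.append(len(k_simplices))
--
--     return betti[:3]  # Retorna apenas os primeiros
-- ===== SOURCE B (Python) =====
-- def betti_numbers_approx(simplicial_complex):
--     """Números de Betti aproximados de um complexo simplicial."""
--     if not simplicial_complex:
--         return [0]
--
--     # One pass: tally simplex sizes and track the largest size.
--     counts = {}
--     max_len = 0
--     for s in simplicial_complex:
--         n = len(s)
--         counts[n] = counts.get(n, 0) + 1
--         if max_len < n:
--             max_len = n
--
--     # max_dim + 1 == max_len; only the first 3 dimensions are ever returned.
--     return [counts.get(d + 1, 0) for d in range(min(max_len, 3))]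
-- ===== Notes on version B (the rewrite author's own statement) =====
-- stated objective: faster
-- what changed: Replaces the per-dimension rescan of the whole complex with a single pass building a size-count table (and the running max), then reads at most three entries from the table.
import Mathlib
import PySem

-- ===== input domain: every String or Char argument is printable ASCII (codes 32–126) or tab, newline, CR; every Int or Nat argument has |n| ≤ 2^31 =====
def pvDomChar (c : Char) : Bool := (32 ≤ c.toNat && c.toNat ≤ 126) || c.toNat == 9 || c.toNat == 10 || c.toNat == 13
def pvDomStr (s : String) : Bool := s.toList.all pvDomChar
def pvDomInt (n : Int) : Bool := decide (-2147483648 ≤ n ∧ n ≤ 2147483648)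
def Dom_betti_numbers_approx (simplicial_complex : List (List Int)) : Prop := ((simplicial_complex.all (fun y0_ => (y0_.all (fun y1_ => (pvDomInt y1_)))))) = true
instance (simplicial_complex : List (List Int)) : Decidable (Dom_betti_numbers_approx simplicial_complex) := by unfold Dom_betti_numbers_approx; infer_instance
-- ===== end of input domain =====

-- B replaces A's per-dimension rescan with one counting pass over the complex; return value proved equal.

-- ===== PORT A =====
def betti_numbers_approx (simplicial_complex : List (List Int)) : List Int :=
  if simplicial_complex = [] then [0]
  else
    -- max(len(simplex) - 1 for simplex in simplicial_complex)
    let max_dim : Int :=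
      match simplicial_complex.map (fun s => (s.length : Int) - 1) with
      | [] => 0
      | x :: t => t.foldl max x
    -- for dim in range(max_dim + 1): betti.append(len([s for s in sc if len(s) == dim + 1]))
    let betti := (PySem.List.pyRange 0 (max_dim + 1) 1).foldl
      (fun acc dim =>
        acc ++ [((simplicial_complex.filter
          (fun s => (s.length : Int) == dim + 1)).length : Int)]) []
    PySem.List.slice betti none (some 3)  -- betti[:3]

-- ===== PORT B =====
def betti_numbers_approx_alt (simplicial_complex : List (List Int)) : List Int :=
  if simplicial_complex = [] then [0]
  else
    -- one pass: counts[len(s)] += 1 and running max_len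
    let st := simplicial_complex.foldl
      (fun (p : PySem.Dict Int Int × Int) s =>
        let n : Int := s.length
        (p.1.insert n (p.1.getD n 0 + 1), if p.2 < n then n else p.2))
      (PySem.Dict.empty, 0)
    -- [counts.get(d + 1, 0) for d in range(min(max_len, 3))]
    (PySem.List.pyRange 0 (min st.2 3) 1).map (fun d => st.1.getD (d + 1) 0)

-- ===== PRECONDITION & SPEC =====
def Spec_betti_numbers_approx (simplicial_complex : List (List Int)) (out : List Int) : Prop := out = betti_numbers_approx_alt simplicial_complex
instance (simplicial_complex : List (List Int)) (out : List Int) : Decidable (Spec_betti_numbers_approx simplicial_complex out) := by unfold Spec_betti_numbers_approx; infer_instance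

-- ===== CLAIM (what is proved, stated in full; the proofs are below) =====
def Claim_equal_betti_numbers_approx : Prop := ∀ (simplicial_complex : List (List Int)), Dom_betti_numbers_approx simplicial_complex → Spec_betti_numbers_approx simplicial_complex (betti_numbers_approx simplicial_complex)

-- ===== LEMMAS AND PROOFS =====

-- B's pair fold splits into a dict fold and a max fold.
theorem pv_fold_pair (l : List (List Int)) (d : PySem.Dict Int Int) (m : Int) :
    l.foldl (fun (p : PySem.Dict Int Int × Int) s =>
        let n : Int := s.length
        (p.1.insert n (p.1.getD n 0 + 1), if p.2 < n then n else p.2)) (d, m)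
    = ((l.map (fun s => (s.length : Int))).foldl
        (fun d x => d.insert x (d.getD x 0 + 1)) d,
       (l.map (fun s => (s.length : Int))).foldl max m) := by
  induction l generalizing d m with
  | nil => rfl
  | cons a t ih =>
      have hm : (if m < (a.length : Int) then (a.length : Int) else m)
          = max m (a.length : Int) := by
        rcases lt_or_ge m (a.length : Int) with h | h
        · simp [h, max_eq_right h.le]
        · simp [not_lt.mpr h, max_eq_left h]
      simp only [List.foldl_cons, List.map_cons, hm, ih]

-- shifting the accumulator of a running max by -1
theorem pv_foldl_max_sub_one (t : List Int) (x : Int) :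
    (t.map (fun n => n - 1)).foldl max (x - 1) = t.foldl max x - 1 := by
  induction t generalizing x with
  | nil => rfl
  | cons a l ih =>
      simp only [List.map_cons, List.foldl_cons]
      rw [max_sub_sub_right, ih]

theorem pv_foldl_max_nonneg (t : List Int) (x : Int) (hx : 0 ≤ x) :
    x ≤ t.foldl max x := by
  induction t generalizing x with
  | nil => simp
  | cons a l ih =>
      simp only [List.foldl_cons]
      exact le_trans (le_max_left x a) (ih _ (le_trans hx (le_max_left x a)))

-- ===== VERDICT (by name: the statement is the Claim_ definition above) =====
theorem betti_numbers_approx_spec : Claim_equal_betti_numbers_approx := by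
  intro sc _
  unfold Spec_betti_numbers_approx betti_numbers_approx betti_numbers_approx_alt
  rcases sc with _ | ⟨x, t⟩
  · rfl
  · simp only [reduceCtorEq, if_false, List.map_cons]
    rw [pv_fold_pair]
    dsimp only
    set M : Int := (t.map (fun s => (s.length : Int) - 1)).foldl max ((x.length : Int) - 1) with hM
    have hmaxcomp : List.foldl max 0 ((x :: t).map (fun s => (s.length : Int))) = M + 1 := by
      simp only [List.map_cons, List.foldl_cons]
      have h0 : max (0 : Int) (x.length : Int) = (x.length : Int) :=
        max_eq_right (by positivity)
      rw [h0, hM]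
      have hmm : (t.map (fun s => (s.length : Int) - 1))
          = ((t.map (fun s => (s.length : Int))).map (fun n => n - 1)) := by
        simp [List.map_map, Function.comp]
      rw [hmm, pv_foldl_max_sub_one]
      omega
    rw [hmaxcomp]
    have hMnn : 0 ≤ M + 1 := by
      have h2 := pv_foldl_max_nonneg ((x :: t).map (fun s => (s.length : Int))) 0 le_rfl
      rw [hmaxcomp] at h2
      exact h2
    -- A's loop is a map
    rw [PySem.List.foldl_append_singleton_eq_map, List.nil_append]
    -- the dict is a counter of lengths
    rw [PySem.Dict.foldl_insert_getD_add_one_eq_counter]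
    -- slice [:3] is take 3
    rw [PySem.List.slice_to]
    -- both ranges as List.range
    rw [PySem.List.pyRange_one, PySem.List.pyRange_one]
    simp only [Int.sub_zero]
    rw [List.map_map, List.map_map, ← List.map_take, List.take_range]
    rw [show Int.toNat 3 = 3 from rfl]
    rw [show min 3 (M + 1).toNat = (min (M + 1) 3).toNat by omega]
    apply List.map_congr_left
    intro k _
    simp only [Function.comp_apply]
    set dim : Int := 0 + (k : Int) with hdim
    rw [PySem.Dict.getD_counter]
    have hc : ((x :: t).map (fun s => (s.length : Int))).count (dim + 1)
        = (x :: t).countP (fun s => (s.length : Int) == dim + 1) := by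
      rw [List.count_eq_countP, List.countP_map]
      rfl
    rw [hc, List.countP_eq_length_filter]
    norm_num
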